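-- pv_equiv track=rewrite | github.com/DiyaanPulikkal/NavLogic-Bangkok | Orchestrator.py | _format_route
-- ===== SOURCE A (Python) =====
-- LINE_DISPLAY_NAMES = {
--     'bts_sukhumvit': 'BTS Sukhumvit Line',
--     'bts_silom':     'BTS Silom Line',
--     'gold':          'BTS Gold Line',
--     'mrt_blue':      'MRT Blue Line',
--     'airport_rail_link': 'Airport Rail Link',
-- }
--
-- def _format_route(path: list, cost: int, station_lines: dict) -> str:
--     output = [
--         f"Route: {path[0]}  →  {path[-1]}",
--         f"Estimated travel time: ~{cost} minutes\n",
--     ]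
--
--     step = 1
--     i = 0
--     while i < len(path) - 1:
--         a = path[i]
--         b = path[i + 1]
--         a_lines = set(station_lines.get(a, []))
--         b_lines = set(station_lines.get(b, []))
--         shared = a_lines & b_lines
--
--         if not shared:
--             # No common line → inter-line transfer (walking connection)
--             output.append(f"  [Transfer] Walk from {a}  →  {b}")
--             i += 1
--             continue
--
--         # Ride this line as far as possible before the line changes
--         seg_line = next(iter(shared))
--         seg_start = a
--
--         j = i + 1
--         while j < len(path) - 1:
--             c = path[j]
--             d = path[j + 1]
--             c_lines = set(station_lines.get(c, []))
--             d_lines = set(station_lines.get(d, []))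
--             if seg_line in (c_lines & d_lines):
--                 j += 1
--             else:
--                 break
--
--         seg_end = path[j]
--         display = LINE_DISPLAY_NAMES.get(seg_line, seg_line)
--         output.append(f"  Step {step}: {display}")
--         output.append(f"    Board at : {seg_start}")
--         output.append(f"    Alight at: {seg_end}")
--         step += 1
--         i = j
--
--     return "\n".join(output)
-- ===== SOURCE B (Python) =====
-- LINE_DISPLAY_NAMES = {
--     'bts_sukhumvit': 'BTS Sukhumvit Line',
--     'bts_silom':     'BTS Silom Line',
--     'gold':          'BTS Gold Line',
--     'mrt_blue':      'MRT Blue Line',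
--     'airport_rail_link': 'Airport Rail Link',
-- }
--
-- def _format_route(path: list, cost: int, station_lines: dict) -> str:
--     out = [
--         f"Route: {path[0]}  \u2192  {path[-1]}",
--         f"Estimated travel time: ~{cost} minutes\n",
--     ]
--     step = 1
--     active = None  # (riding line, boarding station) of the open segment, if any
--     for k in range(len(path) - 1):
--         shared = set(station_lines.get(path[k], [])) & set(station_lines.get(path[k + 1], []))
--         if active is not None and active[0] not in shared:
--             line, start = active
--             out.append(f"  Step {step}: {LINE_DISPLAY_NAMES.get(line, line)}")
--             out.append(f"    Board at : {start}")
--             out.append(f"    Alight at: {path[k]}")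
--             step += 1
--             active = None
--         if active is None:
--             if shared:
--                 active = (next(iter(shared)), path[k])
--             else:
--                 out.append(f"  [Transfer] Walk from {path[k]}  \u2192  {path[k + 1]}")
--     if active is not None:
--         line, start = active
--         out.append(f"  Step {step}: {LINE_DISPLAY_NAMES.get(line, line)}")
--         out.append(f"    Board at : {start}")
--         out.append(f"    Alight at: {path[-1]}")
--     return "\n".join(out)
-- ===== Notes on version B (the rewrite author's own statement) =====
-- stated objective: alternative
-- what changed: A's inner lookahead while-loop (which re-derives shared line-sets to find each segment's end before emitting it) is removed entirely: B is one linear scan over the edges carrying an explicit active-segment state (riding line, boarding station) that emits transfers immediately and closes segments on the fly, with a final flush after the loop.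
import Mathlib
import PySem

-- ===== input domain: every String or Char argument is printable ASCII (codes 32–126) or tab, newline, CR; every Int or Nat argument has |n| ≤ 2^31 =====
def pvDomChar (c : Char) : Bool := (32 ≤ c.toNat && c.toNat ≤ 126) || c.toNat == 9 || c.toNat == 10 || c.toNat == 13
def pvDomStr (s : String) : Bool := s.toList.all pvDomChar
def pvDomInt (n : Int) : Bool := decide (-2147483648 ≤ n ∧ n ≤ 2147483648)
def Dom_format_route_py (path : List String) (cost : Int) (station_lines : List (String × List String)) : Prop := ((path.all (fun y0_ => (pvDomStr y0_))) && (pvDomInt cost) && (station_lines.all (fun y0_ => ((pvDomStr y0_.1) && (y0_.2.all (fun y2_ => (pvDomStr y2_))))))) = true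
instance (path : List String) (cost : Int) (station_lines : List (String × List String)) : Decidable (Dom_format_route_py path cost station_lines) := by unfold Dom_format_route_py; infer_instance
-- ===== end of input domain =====

-- B replaces A's nested lookahead while-loop by one linear scan that carries an explicit
-- active-segment state and closes segments on the fly; alternative decomposition, same cost.

-- ===== PORT A =====
def pvLineNames : PySem.Dict String String :=
  PySem.Dict.ofList [("bts_sukhumvit", "BTS Sukhumvit Line"),
   ("bts_silom", "BTS Silom Line"),
   ("gold", "BTS Gold Line"),
   ("mrt_blue", "MRT Blue Line"),
   ("airport_rail_link", "Airport Rail Link")]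

-- set(station_lines.get(s, []))
def pvLines (station_lines : List (String × List String)) (s : String) : List String :=
  PySem.Set.ofList (PySem.Dict.getD (PySem.Dict.ofList station_lines) s [])

-- set(station_lines.get(path[k], [])) & set(station_lines.get(path[k+1], []))  (k in range)
def pvShared (path : List String) (station_lines : List (String × List String)) (k : Nat) : List String :=
  PySem.Set.inter (pvLines station_lines (path.getD k "")) (pvLines station_lines (path.getD (k+1) ""))

-- A's inner while: extend j while seg_line stays in the shared set of edge j
def pvAInner (path : List String) (station_lines : List (String × List String)) (seg_line : String) (j : Nat) : Nat :=
  if h : j < path.length - 1 then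
    if seg_line ∈ pvShared path station_lines j then pvAInner path station_lines seg_line (j+1)
    else j
  else j
termination_by path.length - 1 - j
decreasing_by exact Nat.sub_succ_lt_self _ _ h

theorem pvAInner_ge (path : List String) (station_lines : List (String × List String)) (seg_line : String) (j : Nat) :
    j ≤ pvAInner path station_lines seg_line j := by
  unfold pvAInner
  split
  · split
    · exact Nat.le_trans (Nat.le_succ j) (pvAInner_ge path station_lines seg_line (j+1))
    · exact Nat.le_refl j
  · exact Nat.le_refl j
termination_by path.length - 1 - j
decreasing_by exact Nat.sub_succ_lt_self _ _ (by assumption)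

-- A's outer while over i (next(iter(shared)) is the head of the shared set, exact under Pre_:
-- the shared set has at most one element there, so Python's hash iteration order cannot matter)
def pvALoop (path : List String) (station_lines : List (String × List String)) (stepn : Int) (i : Nat) (acc : List String) : List String :=
  if h : i < path.length - 1 then
    let a := path.getD i ""
    let b := path.getD (i+1) ""
    let shared := pvShared path station_lines i
    if shared = [] then
      pvALoop path station_lines stepn (i+1) (acc ++ ["  [Transfer] Walk from " ++ a ++ "  →  " ++ b])
    else
      let seg_line := shared.headD ""
      let j := pvAInner path station_lines seg_line (i+1)
      pvALoop path station_lines (stepn+1) j (acc ++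
        ["  Step " ++ PySem.Int.toStr stepn ++ ": " ++ PySem.Dict.getD pvLineNames seg_line seg_line,
         "    Board at : " ++ a,
         "    Alight at: " ++ path.getD j ""])
  else acc
termination_by path.length - 1 - i
decreasing_by
  · exact Nat.sub_succ_lt_self _ _ h
  · exact Nat.sub_lt_sub_left h
      (Nat.lt_of_lt_of_le (Nat.lt_succ_self i) (pvAInner_ge path station_lines ((pvShared path station_lines i).headD "") (i+1)))

def format_route_py (path : List String) (cost : Int) (station_lines : List (String × List String)) : String :=
  -- path[0] / path[-1] raise IndexError on an empty path (excluded by Pre_): .getD "" is never taken there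
  let output := ["Route: " ++ ((PySem.List.pyGet? path 0).getD "") ++ "  →  " ++ ((PySem.List.pyGet? path (-1)).getD ""),
                 "Estimated travel time: ~" ++ PySem.Int.toStr cost ++ " minutes\n"]
  PySem.Str.join "\n" (pvALoop path station_lines 1 0 output)

-- ===== PORT B =====
-- Source B's loop body: one edge k, state = (out, step, active segment); closes, then transfers/opens
def pvBBody (path : List String) (station_lines : List (String × List String))
    (st : List String × Int × Option (String × String)) (k : Nat) :
    List String × Int × Option (String × String) :=
  let shared := pvShared path station_lines k
  let st1 :=
    match st with
    | (acc, stepn, some (line, start)) =>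
      if line ∈ shared then (acc, stepn, some (line, start))
      else (acc ++
        ["  Step " ++ PySem.Int.toStr stepn ++ ": " ++ PySem.Dict.getD pvLineNames line line,
         "    Board at : " ++ start,
         "    Alight at: " ++ path.getD k ""], stepn + 1, (none : Option (String × String)))
    | (acc, stepn, none) => (acc, stepn, none)
  match st1 with
  | (acc, stepn, some p) => (acc, stepn, some p)
  | (acc, stepn, none) =>
    if shared = [] then
      (acc ++ ["  [Transfer] Walk from " ++ path.getD k "" ++ "  →  " ++ path.getD (k+1) ""], stepn, none)
    else (acc, stepn, some (shared.headD "", path.getD k ""))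

-- Source B after the loop: emit the still-open segment, alighting at path[-1]
def pvBFin (path : List String) (st : List String × Int × Option (String × String)) : List String :=
  match st with
  | (acc, _, none) => acc
  | (acc, stepn, some (line, start)) =>
    acc ++
      ["  Step " ++ PySem.Int.toStr stepn ++ ": " ++ PySem.Dict.getD pvLineNames line line,
       "    Board at : " ++ start,
       "    Alight at: " ++ ((PySem.List.pyGet? path (-1)).getD "")]

def format_route_py_alt (path : List String) (cost : Int) (station_lines : List (String × List String)) : String :=
  let out := ["Route: " ++ ((PySem.List.pyGet? path 0).getD "") ++ "  →  " ++ ((PySem.List.pyGet? path (-1)).getD ""),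
              "Estimated travel time: ~" ++ PySem.Int.toStr cost ++ " minutes\n"]
  PySem.Str.join "\n"
    (pvBFin path ((List.range (path.length - 1)).foldl (pvBBody path station_lines) (out, 1, none)))

-- ===== PRECONDITION & SPEC =====
-- Pre_ excludes (a) the empty path, where A raises IndexError on path[0], and (b) paths in which some
-- adjacent pair of stations shares MORE than one line: there the ride line both programs pick with
-- next(iter(shared)) depends on Python's hash-seeded set iteration order, an accidental tie-break no
-- deterministic port can reproduce (A and B still pick the same element as each other).
def Pre_format_route_py (path : List String) (cost : Int) (station_lines : List (String × List String)) : Prop :=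
  path ≠ [] ∧ (List.range (path.length - 1)).all (fun k => decide ((pvShared path station_lines k).length ≤ 1)) = true
instance (path : List String) (cost : Int) (station_lines : List (String × List String)) : Decidable (Pre_format_route_py path cost station_lines) := by unfold Pre_format_route_py; infer_instance

def pvWitness_format_route_py : List String × Int × (List (String × List String)) :=
  (["a", "b", "c"], 12, [("a", ["l1"]), ("b", ["l1", "l2"]), ("c", ["l2"])])

def Spec_format_route_py (path : List String) (cost : Int) (station_lines : List (String × List String)) (out : String) : Prop := out = format_route_py_alt path cost station_lines
instance (path : List String) (cost : Int) (station_lines : List (String × List String)) (out : String) : Decidable (Spec_format_route_py path cost station_lines out) := by unfold Spec_format_route_py; infer_instance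

-- ===== CLAIM (what is proved, stated in full; the proofs are below) =====
def Claim_equal_format_route_py : Prop := ∀ (path : List String) (cost : Int) (station_lines : List (String × List String)), Dom_format_route_py path cost station_lines → Pre_format_route_py path cost station_lines → Spec_format_route_py path cost station_lines (format_route_py path cost station_lines)

-- ===== LEMMAS AND PROOFS =====

-- B's scan over the edges k, k+1, …, n-2 (Source B's 'for k in range(n-1)' from position k on)
def pvBRun (path : List String) (station_lines : List (String × List String)) (k : Nat)
    (st : List String × Int × Option (String × String)) : List String × Int × Option (String × String) :=
  (List.range' k (path.length - 1 - k)).foldl (pvBBody path station_lines) st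

theorem pvBRun_stop (path : List String) (station_lines : List (String × List String)) (k : Nat)
    (hk : ¬ k < path.length - 1) (st : List String × Int × Option (String × String)) :
    pvBRun path station_lines k st = st := by
  unfold pvBRun
  have : path.length - 1 - k = 0 := by omega
  rw [this]
  rfl

theorem pvBRun_cons (path : List String) (station_lines : List (String × List String)) (k : Nat)
    (hk : k < path.length - 1) (st : List String × Int × Option (String × String)) :
    pvBRun path station_lines k st = pvBRun path station_lines (k+1) (pvBBody path station_lines st k) := by
  unfold pvBRun
  have h1 : path.length - 1 - k = (path.length - 1 - (k+1)) + 1 := by omega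
  rw [h1, List.range'_succ]
  rfl

theorem pvLast_eq (path : List String) (hne : path ≠ []) :
    (PySem.List.pyGet? path (-1)).getD "" = path.getD (path.length - 1) "" := by
  have hlen : 1 ≤ path.length := List.length_pos_iff.mpr hne
  simp [PySem.List.pyGet?, PySem.List.pyIdx?, List.getD_eq_getElem?_getD, hlen]

-- the scan with an open segment closes exactly where A's inner lookahead stops
theorem pvAInner_le (path : List String) (station_lines : List (String × List String)) (seg_line : String) (j : Nat)
    (hle : j ≤ path.length - 1) : pvAInner path station_lines seg_line j ≤ path.length - 1 := by
  unfold pvAInner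
  split
  · split
    · exact pvAInner_le path station_lines seg_line (j+1) (by assumption)
    · exact hle
  · exact hle
termination_by path.length - 1 - j
decreasing_by exact Nat.sub_succ_lt_self _ _ (by assumption)

theorem pvRun_active (path : List String) (station_lines : List (String × List String))
    (line start : String) (k : Nat) (acc : List String) (stepn : Int) :
    pvBFin path (pvBRun path station_lines k (acc, stepn, some (line, start))) =
      (if h : pvAInner path station_lines line k < path.length - 1 then
        pvBFin path (pvBRun path station_lines (pvAInner path station_lines line k)
          (acc ++
            ["  Step " ++ PySem.Int.toStr stepn ++ ": " ++ PySem.Dict.getD pvLineNames line line,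
             "    Board at : " ++ start,
             "    Alight at: " ++ path.getD (pvAInner path station_lines line k) ""], stepn + 1, none))
      else
        acc ++
          ["  Step " ++ PySem.Int.toStr stepn ++ ": " ++ PySem.Dict.getD pvLineNames line line,
           "    Board at : " ++ start,
           "    Alight at: " ++ ((PySem.List.pyGet? path (-1)).getD "")]) := by
  by_cases hk : k < path.length - 1
  · rw [pvBRun_cons path station_lines k hk]
    by_cases hmem : line ∈ pvShared path station_lines k
    · have hbody : pvBBody path station_lines (acc, stepn, some (line, start)) k
          = (acc, stepn, some (line, start)) := by
        unfold pvBBody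
        simp [hmem]
      have hinner : pvAInner path station_lines line k = pvAInner path station_lines line (k+1) := by
        rw [pvAInner, dif_pos hk, if_pos hmem]
      rw [hbody, hinner]
      exact pvRun_active path station_lines line start (k+1) acc stepn
    · have hinner : pvAInner path station_lines line k = k := by
        rw [pvAInner, dif_pos hk, if_neg hmem]
      have hbody : pvBBody path station_lines (acc, stepn, some (line, start)) k
          = pvBBody path station_lines
              (acc ++
                ["  Step " ++ PySem.Int.toStr stepn ++ ": " ++ PySem.Dict.getD pvLineNames line line,
                 "    Board at : " ++ start,
                 "    Alight at: " ++ path.getD k ""], stepn + 1, none) k := by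
        unfold pvBBody
        simp [hmem]
      rw [hbody, ← pvBRun_cons path station_lines k hk, hinner, dif_pos (hinner ▸ hk)]
  · rw [pvBRun_stop path station_lines k hk]
    have hinner : pvAInner path station_lines line k = k := by
      rw [pvAInner, dif_neg hk]
    rw [hinner, dif_neg hk]
    rfl
termination_by path.length - 1 - k
decreasing_by exact Nat.sub_succ_lt_self _ _ hk

-- A's outer loop = B's scan, from any position with no open segment
theorem pvLoop_eq (path : List String) (station_lines : List (String × List String))
    (stepn : Int) (i : Nat) (acc : List String) :
    pvALoop path station_lines stepn i acc = pvBFin path (pvBRun path station_lines i (acc, stepn, none)) := by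
  rw [pvALoop]
  by_cases hi : i < path.length - 1
  · rw [dif_pos hi, pvBRun_cons path station_lines i hi]
    by_cases he : pvShared path station_lines i = []
    · rw [if_pos he]
      have hbody : pvBBody path station_lines (acc, stepn, none) i
          = (acc ++ ["  [Transfer] Walk from " ++ path.getD i "" ++ "  →  " ++ path.getD (i+1) ""],
             stepn, none) := by
        unfold pvBBody
        simp [he]
      rw [hbody]
      exact pvLoop_eq path station_lines stepn (i+1) _
    · rw [if_neg he]
      have hbody : pvBBody path station_lines (acc, stepn, none) i
          = (acc, stepn, some ((pvShared path station_lines i).headD "", path.getD i "")) := by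
        unfold pvBBody
        simp [he]
      rw [hbody,
        pvRun_active path station_lines ((pvShared path station_lines i).headD "") (path.getD i "") (i+1) acc stepn]
      by_cases hj : pvAInner path station_lines ((pvShared path station_lines i).headD "") (i+1) < path.length - 1
      · rw [dif_pos hj]
        exact pvLoop_eq path station_lines (stepn+1) _ _
      · have hne : path ≠ [] := by
          intro h; rw [h] at hi; simp at hi
        have hj' : pvAInner path station_lines ((pvShared path station_lines i).headD "") (i+1) = path.length - 1 := by
          have h2 := pvAInner_le path station_lines ((pvShared path station_lines i).headD "") (i+1) (by omega)
          omega
        rw [dif_neg hj, pvLast_eq path hne]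
        show pvALoop path station_lines (stepn+1)
            (pvAInner path station_lines ((pvShared path station_lines i).headD "") (i+1))
            (acc ++
              ["  Step " ++ PySem.Int.toStr stepn ++ ": "
                 ++ PySem.Dict.getD pvLineNames ((pvShared path station_lines i).headD "") ((pvShared path station_lines i).headD ""),
               "    Board at : " ++ path.getD i "",
               "    Alight at: " ++ path.getD (pvAInner path station_lines ((pvShared path station_lines i).headD "") (i+1)) ""]) = _
        rw [hj', pvALoop, dif_neg (by omega : ¬ path.length - 1 < path.length - 1)]
  · rw [dif_neg hi, pvBRun_stop path station_lines i hi]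
    rfl
termination_by path.length - 1 - i
decreasing_by
  · omega
  · have := pvAInner_ge path station_lines ((pvShared path station_lines i).headD "") (i+1); omega

-- ===== VERDICT (by name: the statement is the Claim_ definition above) =====
theorem format_route_py_spec : Claim_equal_format_route_py := by
  intro path cost station_lines _ _
  unfold Spec_format_route_py format_route_py format_route_py_alt
  rw [List.range_eq_range']
  exact congrArg (PySem.Str.join "\n") (pvLoop_eq path station_lines 1 0 _)
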